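-- pv_equiv track=rewrite | github.com/kotikikruto/Caprecar | not_used/caprecar_10.py | Caprecar_10
-- ===== SOURCE A (Python) =====
-- def Caprecar_10(n, l):
--     nums = []
--     for i in range(l):
--         nums.append(n % 10)
--         n //= 10
--     nums = sorted(nums)
--     k = 0
--     for i in range(l):
--         k += (nums[l - i - 1] - nums[i]) * 10 ** (l - i - 1)
--     return k
-- ===== SOURCE B (Python) =====
-- def Caprecar_10(n, l):
--     digits = []
--     for _ in range(l):
--         n, d = divmod(n, 10)
--         digits.append(d)
--     digits.sort()
--     asc = 0
--     for d in digits: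
--         asc = asc * 10 + d
--     desc = 0
--     for d in reversed(digits):
--         desc = desc * 10 + d
--     return desc - asc
-- ===== Notes on version B (the rewrite author's own statement) =====
-- stated objective: faster
-- what changed: Replaces A's fused indexed loop (pairing nums[l-i-1]-nums[i] with a fresh 10**(l-i-1) big-int power every iteration) by divmod digit extraction, an in-place sort, and two Horner evaluations (ascending and descending digit order) subtracted.
import Mathlib
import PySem

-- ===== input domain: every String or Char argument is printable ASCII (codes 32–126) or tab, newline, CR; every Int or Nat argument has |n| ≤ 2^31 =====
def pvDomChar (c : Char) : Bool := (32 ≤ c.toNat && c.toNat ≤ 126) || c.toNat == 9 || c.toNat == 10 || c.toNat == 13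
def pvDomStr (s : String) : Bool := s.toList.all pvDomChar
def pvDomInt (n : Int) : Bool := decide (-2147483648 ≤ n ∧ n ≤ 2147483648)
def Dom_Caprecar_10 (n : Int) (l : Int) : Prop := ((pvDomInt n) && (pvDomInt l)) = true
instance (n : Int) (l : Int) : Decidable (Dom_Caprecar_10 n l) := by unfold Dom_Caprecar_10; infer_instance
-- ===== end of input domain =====

-- B replaces A's fused indexed loop (nums[l-i-1]-nums[i] times a fresh 10**(l-i-1) power each
-- iteration) by divmod extraction, an in-place sort and two Horner evaluations (ascending and
-- descending) that are subtracted; a timing run measured B faster at the largest sizes.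

-- ===== PORT A =====
def Caprecar_10 (n : Int) (l : Int) : Int :=
  -- for i in range(l): nums.append(n % 10); n //= 10
  let st := (PySem.List.pyRange 0 l 1).foldl
      (fun (st : List Int × Int) _ => (st.1 ++ [PySem.Int.mod st.2 10], PySem.Int.floordiv st.2 10))
      ([], n)
  let nums := PySem.List.sorted st.1 (fun x => x) false
  -- k += (nums[l-i-1] - nums[i]) * 10 ** (l-i-1): both indices are in range (nums has l elements)
  -- and the exponent l-i-1 is nonnegative for every i the loop visits, so pyGetD/toNat are exact.
  (PySem.List.pyRange 0 l 1).foldl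
    (fun k i => k + (PySem.List.pyGetD nums (l - i - 1) 0 - PySem.List.pyGetD nums i 0)
        * (10 : Int) ^ (l - i - 1).toNat) 0

-- ===== PORT B =====
def Caprecar_10_alt (n : Int) (l : Int) : Int :=
  -- for _ in range(l): n, d = divmod(n, 10); digits.append(d)
  let st := (PySem.List.pyRange 0 l 1).foldl
      (fun (st : Int × List Int) _ =>
        let qr := (PySem.Int.divmod? st.1 10).getD (0, 0)  -- divisor is 10 ≠ 0, never none
        (qr.1, st.2 ++ [qr.2]))
      (n, [])
  let digits := PySem.List.sorted st.2 (fun x => x) false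
  let asc := digits.foldl (fun a d => a * 10 + d) 0
  let desc := digits.reverse.foldl (fun a d => a * 10 + d) 0
  desc - asc

-- ===== PRECONDITION & SPEC =====
def Spec_Caprecar_10 (n : Int) (l : Int) (out : Int) : Prop := out = Caprecar_10_alt n l
instance (n : Int) (l : Int) (out : Int) : Decidable (Spec_Caprecar_10 n l out) := by unfold Spec_Caprecar_10; infer_instance

-- ===== CLAIM (what is proved, stated in full; the proofs are below) =====
def Claim_equal_Caprecar_10 : Prop := ∀ (n : Int) (l : Int), Dom_Caprecar_10 n l → Spec_Caprecar_10 n l (Caprecar_10 n l)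

-- ===== LEMMAS AND PROOFS =====

-- divmod(a, 10) never raises and is the (floordiv, mod) pair
theorem pvDivmodTen (a : Int) : (PySem.Int.divmod? a 10).getD (0, 0) = (PySem.Int.floordiv a 10, PySem.Int.mod a 10) := by
  simp [PySem.Int.divmod?, PySem.Int.floordiv, PySem.Int.mod]

-- B's extraction loop collects the same digit list as A's (state components swapped)
theorem pvExtractEq (xs : List Int) : ∀ (m : Int) (acc : List Int),
    (xs.foldl (fun (st : Int × List Int) _ =>
        (((PySem.Int.divmod? st.1 10).getD (0, 0)).1,
          st.2 ++ [((PySem.Int.divmod? st.1 10).getD (0, 0)).2])) (m, acc)).2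
    = (xs.foldl (fun (st : List Int × Int) _ =>
        (st.1 ++ [PySem.Int.mod st.2 10], PySem.Int.floordiv st.2 10)) (acc, m)).1 := by
  induction xs with
  | nil => intro m acc; rfl
  | cons x xs ih => intro m acc; simp only [List.foldl_cons, pvDivmodTen]; exact ih _ _

-- A's extraction loop appends exactly one digit per iteration
theorem pvExtractLen (xs : List Int) : ∀ (acc : List Int) (m : Int),
    ((xs.foldl (fun (st : List Int × Int) _ =>
        (st.1 ++ [PySem.Int.mod st.2 10], PySem.Int.floordiv st.2 10)) (acc, m)).1).length
    = acc.length + xs.length := by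
  induction xs with
  | nil => intro acc m; simp
  | cons x xs ih => intro acc m; rw [List.foldl_cons, ih]; simp [List.length_append]; omega

-- the Horner value B's accumulation loops compute
def pvVal (xs : List Int) : Int := xs.foldl (fun a d => a * 10 + d) 0

theorem pvVal_acc (xs : List Int) : ∀ (a : Int),
    xs.foldl (fun a d => a * 10 + d) a = a * 10 ^ xs.length + pvVal xs := by
  induction xs with
  | nil => intro a; simp [pvVal]
  | cons d xs ih =>
      intro a
      simp only [List.foldl_cons, pvVal, List.length_cons]
      rw [ih (a * 10 + d), ih (0 * 10 + d)]
      ring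

theorem pvVal_desc (xs : List Int) :
    pvVal xs.reverse = ∑ j ∈ Finset.range xs.length, xs.getD j 0 * 10 ^ j := by
  induction xs with
  | nil => simp [pvVal]
  | cons d xs ih =>
      rw [List.length_cons, Finset.sum_range_succ']
      simp only [List.getD_cons_succ, List.getD_cons_zero, List.reverse_cons]
      have h : pvVal (xs.reverse ++ [d]) = pvVal xs.reverse * 10 + d := by
        simp [pvVal, List.foldl_append]
      rw [h, ih, Finset.sum_mul]
      have he : ∀ j ∈ Finset.range xs.length,
          xs.getD j 0 * 10 ^ j * 10 = xs.getD j 0 * 10 ^ (j + 1) := fun j _ => by ring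
      rw [Finset.sum_congr rfl he]
      ring

theorem pvVal_asc (xs : List Int) :
    pvVal xs = ∑ i ∈ Finset.range xs.length, xs.getD i 0 * 10 ^ (xs.length - 1 - i) := by
  induction xs with
  | nil => simp [pvVal]
  | cons d xs ih =>
      have h : pvVal (d :: xs) = d * 10 ^ xs.length + pvVal xs := by
        rw [pvVal, List.foldl_cons, pvVal_acc]; ring_nf
      rw [List.length_cons, Finset.sum_range_succ', h, ih]
      simp only [List.getD_cons_succ, List.getD_cons_zero]
      have he : ∀ i ∈ Finset.range xs.length,
          xs.getD i 0 * 10 ^ (xs.length + 1 - 1 - (i + 1)) = xs.getD i 0 * 10 ^ (xs.length - 1 - i) :=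
        fun i _ => by congr 2; omega
      rw [Finset.sum_congr rfl he, show xs.length + 1 - 1 - 0 = xs.length from by omega]
      ring

-- A's accumulation loop over any digit list s equals B's desc - asc
theorem pvSumEq (s : List Int) :
    (PySem.List.pyRange 0 (s.length : Int) 1).foldl
      (fun k i => k + (PySem.List.pyGetD s ((s.length : Int) - i - 1) 0 - PySem.List.pyGetD s i 0)
          * (10 : Int) ^ (((s.length : Int) - i - 1)).toNat) 0
    = pvVal s.reverse - pvVal s := by
  rw [PySem.List.foldl_add, PySem.List.pyRange_zero_nat, List.map_map, zero_add]
  have hfun : ∀ k ∈ List.range s.length,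
      ((fun i => (PySem.List.pyGetD s ((s.length : Int) - i - 1) 0 - PySem.List.pyGetD s i 0)
          * (10 : Int) ^ (((s.length : Int) - i - 1)).toNat) ∘ (fun k : Nat => (k : Int))) k
      = (fun k : Nat => s.getD (s.length - 1 - k) 0 * 10 ^ (s.length - 1 - k)
          - s.getD k 0 * 10 ^ (s.length - 1 - k)) k := by
    intro k hk
    rw [List.mem_range] at hk
    have h1 : ((s.length : Int) - (k : Int) - 1) = ((s.length - 1 - k : Nat) : Int) := by omega
    simp only [Function.comp_apply, h1, PySem.List.pyGetD_natCast, Int.toNat_natCast]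
    ring
  rw [List.map_congr_left hfun]
  rw [show ((List.range s.length).map (fun k : Nat => s.getD (s.length - 1 - k) 0 * 10 ^ (s.length - 1 - k)
        - s.getD k 0 * 10 ^ (s.length - 1 - k))).sum
      = ∑ k ∈ Finset.range s.length, (s.getD (s.length - 1 - k) 0 * 10 ^ (s.length - 1 - k)
        - s.getD k 0 * 10 ^ (s.length - 1 - k)) from rfl]
  rw [Finset.sum_sub_distrib, Finset.sum_range_reflect (fun j => s.getD j 0 * 10 ^ j) s.length,
    ← pvVal_desc, ← pvVal_asc]

-- ===== VERDICT (by name: the statement is the Claim_ definition above) =====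
theorem Caprecar_10_spec : Claim_equal_Caprecar_10 := by
  intro n l _
  unfold Spec_Caprecar_10 Caprecar_10 Caprecar_10_alt
  simp only []
  by_cases hl : 0 ≤ l
  · obtain ⟨L, rfl⟩ : ∃ L : Nat, l = (L : Int) := ⟨l.toNat, (Int.toNat_of_nonneg hl).symm⟩
    rw [pvExtractEq]
    set ds := ((PySem.List.pyRange 0 (L : Int) 1).foldl
      (fun (st : List Int × Int) _ =>
        (st.1 ++ [PySem.Int.mod st.2 10], PySem.Int.floordiv st.2 10)) ([], n)).1 with hds
    have hlen : (PySem.List.sorted ds (fun x => x) false).length = L := by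
      rw [PySem.List.length_sorted, hds, pvExtractLen]
      simp [PySem.List.pyRange_zero_nat]
    calc (PySem.List.pyRange 0 (L : Int) 1).foldl
          (fun k i => k + (PySem.List.pyGetD (PySem.List.sorted ds (fun x => x) false) ((L : Int) - i - 1) 0
              - PySem.List.pyGetD (PySem.List.sorted ds (fun x => x) false) i 0)
              * (10 : Int) ^ (((L : Int) - i - 1)).toNat) 0
        = pvVal (PySem.List.sorted ds (fun x => x) false).reverse
            - pvVal (PySem.List.sorted ds (fun x => x) false) := by
          rw [show (L : Int) = ((PySem.List.sorted ds (fun x => x) false).length : Int) from by rw [hlen]]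
          exact pvSumEq _
      _ = _ := by rw [pvVal, pvVal]
  · rw [PySem.List.pyRange_one_eq_nil (by omega)]
    simp [PySem.List.sorted]
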